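-- pv_equiv track=rewrite | github.com/charlielockyer-rice/bscs-bench-public | comp140/data/generate_movie_data.py | build_edge_list
-- ===== SOURCE A (Python) =====
-- from collections import defaultdict
-- from itertools import combinations
--
-- def build_edge_list(movie_casts: dict[str, list[str]]) -> list[tuple[str, str, list[str]]]:
--     """
--     Build edge list from movie casts.
--
--     For each movie, every pair of actors shares that movie.
--
--     Returns:
--         List of (actor1, actor2, [movie1, movie2, ...]) tuples
--     """
--     # Track which movies each pair of actors share
--     pair_movies = defaultdict(set)
--
--     for movie, cast in movie_casts.items():
--         for actor1, actor2 in combinations(cast, 2):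
--             # Sort to ensure consistent ordering
--             key = tuple(sorted([actor1, actor2]))
--             pair_movies[key].add(movie)
--
--     # Convert to edge list format
--     edges = []
--     for (actor1, actor2), movies in sorted(pair_movies.items()):
--         edges.append((actor1, actor2, sorted(movies)))
--
--     return edges
-- ===== SOURCE B (Python) =====
-- from itertools import groupby
--
-- def build_edge_list(movie_casts):
--     """Flat rewrite: build the deduplicated list of (pair-key, movie) events,
--     sort it once, and group consecutive runs per pair key."""
--     def pairs(cast):
--         out = []
--         rest = list(cast)
--         while rest:
--             a, rest = rest[0], rest[1:]
--             for b in rest: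
--                 out.append((a, b) if a <= b else (b, a))
--         return out
--
--     events = sorted({(p, m) for m, cast in movie_casts.items() for p in pairs(cast)})
--     return [(a, b, [m for _, m in grp])
--             for (a, b), grp in groupby(events, key=lambda e: e[0])]
-- ===== Notes on version B (the rewrite author's own statement) =====
-- stated objective: alternative
-- what changed: A iterates movies aggregating shared movies incrementally into a defaultdict of sets keyed by actor pair and sorts per pair at the end; B instead builds the flat deduplicated list of (pair-key, movie) events, sorts it once globally, and groups consecutive runs per pair with itertools.groupby.
import Mathlib
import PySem

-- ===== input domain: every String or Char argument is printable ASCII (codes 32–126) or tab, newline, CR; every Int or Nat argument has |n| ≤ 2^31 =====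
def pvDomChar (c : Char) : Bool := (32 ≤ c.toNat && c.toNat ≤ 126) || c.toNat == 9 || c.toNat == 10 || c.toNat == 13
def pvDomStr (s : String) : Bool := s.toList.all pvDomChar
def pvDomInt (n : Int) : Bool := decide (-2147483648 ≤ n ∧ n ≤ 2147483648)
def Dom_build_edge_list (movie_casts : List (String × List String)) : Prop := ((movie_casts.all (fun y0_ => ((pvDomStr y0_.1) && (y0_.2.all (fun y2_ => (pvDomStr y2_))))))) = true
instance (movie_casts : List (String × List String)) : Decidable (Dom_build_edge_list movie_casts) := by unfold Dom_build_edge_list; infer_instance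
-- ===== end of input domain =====

-- B replaces A's incremental dict-of-sets aggregation by a flat scheme: the deduplicated list of
-- (pair-key, movie) events, one global sort, then grouping consecutive runs per pair key.

-- ===== PORT A =====
-- itertools.combinations(cast, 2), each 2-combination destructured to a pair (CPython's order)
def pvCombs2 {α : Type} : List α → List (α × α)
  | [] => []
  | x :: xs => xs.map (fun y => (x, y)) ++ pvCombs2 xs
-- tuple(sorted([a, b])) on two strings (Python's stable sort of a 2-list)
def pvPairKey (a b : String) : String × String := if a ≤ b then (a, b) else (b, a)
def build_edge_list (movie_casts : List (String × List String)) : List (String × String × List String) :=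
  let pair_movies : PySem.Dict (String × String) (PySem.Set String) :=
    movie_casts.foldl (fun pm mc =>
      (pvCombs2 mc.2).foldl (fun pm p =>
        pm.modify (pvPairKey p.1 p.2) [] (fun s => PySem.Set.add s mc.1)) pm)
      PySem.Dict.empty
  -- sorted(pair_movies.items()): the dict's keys are distinct, so Python's tuple sort orders by the
  -- key pair and never compares the set values; tuple comparison of the key = sorted2 on its components
  (PySem.List.sorted2 pair_movies.items (fun it => it.1.1) (fun it => it.1.2)).foldl
    (fun edges it => edges ++ [(it.1.1, it.1.2, PySem.List.sorted it.2 (fun m => m))]) []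

-- ===== PORT B =====
-- B's pairs(cast): while-loop peeling the head off the remaining suffix, appending ordered pairs
def pvPairsLoop (out : List (String × String)) : List String → List (String × String)
  | [] => out
  | a :: rest => pvPairsLoop (rest.foldl (fun o b => o ++ [if a ≤ b then (a, b) else (b, a)]) out) rest
-- itertools.groupby(events, key=e[0]), each group consumed into (a, b, [movies of the run])
def pvGroupRuns : List ((String × String) × String) → List (String × String × List String)
  | [] => []
  | e :: es =>
    (e.1.1, e.1.2, e.2 :: (es.takeWhile (fun x => x.1 == e.1)).map (fun x => x.2)) ::
      pvGroupRuns (es.dropWhile (fun x => x.1 == e.1))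
termination_by l => l.length
decreasing_by simpa using Nat.lt_succ_of_le (List.length_dropWhile_le _ _)
-- sorted({...}) on (pair, movie) tuples: Python's nested-tuple comparison is the lexicographic order
def build_edge_list_alt (movie_casts : List (String × List String)) : List (String × String × List String) :=
  let events := PySem.List.sorted
    (PySem.Set.ofList (movie_casts.flatMap (fun r => (pvPairsLoop [] r.2).map (fun p => (p, r.1)))))
    (fun e => toLex (toLex (e.1.1, e.1.2), e.2))
  pvGroupRuns events


-- ===== PRECONDITION & SPEC =====
def Spec_build_edge_list (movie_casts : List (String × List String)) (out : List (String × String × List String)) : Prop := out = build_edge_list_alt movie_casts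
instance (movie_casts : List (String × List String)) (out : List (String × String × List String)) : Decidable (Spec_build_edge_list movie_casts out) := by unfold Spec_build_edge_list; infer_instance

-- ===== CLAIM (what is proved, stated in full; the proofs are below) =====
def Claim_equal_build_edge_list : Prop := ∀ (movie_casts : List (String × List String)), Dom_build_edge_list movie_casts → Spec_build_edge_list movie_casts (build_edge_list movie_casts)

-- ===== LEMMAS AND PROOFS =====

-- the flattened stream of (pair-key, movie) events A's nested loops process
def pvEvents (mc : List (String × List String)) : List ((String × String) × String) :=
  mc.flatMap (fun r => (pvCombs2 r.2).map (fun p => (pvPairKey p.1 p.2, r.1)))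
theorem pv_flatten_singleton {α β : Type} (l : List α) (f : α → β) :
    (l.map (fun x => [f x])).flatten = l.map f := by
  induction l with
  | nil => simp
  | cons a l ih => simp [ih]
theorem pvPairsLoop_eq : ∀ (rest : List String) (out : List (String × String)),
    pvPairsLoop out rest = out ++ (pvCombs2 rest).map (fun p => pvPairKey p.1 p.2) := by
  intro rest
  induction rest with
  | nil => intro out; simp [pvPairsLoop, pvCombs2]
  | cons a rest ih =>
    intro out
    simp [pvPairsLoop, pvCombs2, ih, List.map_map, Function.comp_def, pvPairKey,
      pv_flatten_singleton]
theorem pv_sorted2_eq_sorted_toLex {α κ₁ κ₂ : Type} [LinearOrder κ₁] [LinearOrder κ₂]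
    (xs : List α) (k1 : α → κ₁) (k2 : α → κ₂) :
    PySem.List.sorted2 xs k1 k2 = PySem.List.sorted xs (fun x => toLex (k1 x, k2 x)) := by
  unfold PySem.List.sorted2 PySem.List.sorted
  simp only [if_neg (by decide : ¬ (false = true))]
  have h : (fun a b => decide (k1 a < k1 b) || !decide (k1 b < k1 a) && decide (k2 a < k2 b))
      = (fun a b => decide (toLex (k1 a, k2 a) < toLex (k1 b, k2 b))) := by
    funext a b
    rcases lt_trichotomy (k1 a) (k1 b) with h | h | h
    · simp [h, Prod.Lex.toLex_lt_toLex]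
    · simp [h, Prod.Lex.toLex_lt_toLex]
    · simp [h.not_gt, h, Prod.Lex.toLex_lt_toLex, h.ne']
  rw [h]
theorem pv_fold_flatten (l : List (String × List String))
    (pm : PySem.Dict (String × String) (PySem.Set String)) :
    l.foldl (fun pm mc =>
      (pvCombs2 mc.2).foldl (fun pm p =>
        pm.modify (pvPairKey p.1 p.2) [] (fun s => PySem.Set.add s mc.1)) pm) pm
    = (pvEvents l).foldl (fun pm e => pm.modify e.1 [] (fun s => PySem.Set.add s e.2)) pm := by
  induction l generalizing pm with
  | nil => simp [pvEvents]
  | cons r l ih =>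
    simp only [List.foldl_cons, pvEvents, List.flatMap_cons, List.foldl_append, ih, List.foldl_map]
theorem pv_getD_fold (l : List ((String × String) × String))
    (d : PySem.Dict (String × String) (PySem.Set String)) (k : String × String) :
    ((l.foldl (fun pm e => pm.modify e.1 [] (fun s => PySem.Set.add s e.2)) d).getD k [])
    = PySem.Set.update (d.getD k []) ((l.filter (fun e => e.1 == k)).map (fun e => e.2)) := by
  induction l generalizing d with
  | nil => simp [PySem.Set.update]
  | cons e l ih =>
    simp only [List.foldl_cons, ih, List.filter_cons]
    by_cases h : e.1 = k
    · subst h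
      simp [PySem.Set.update]
    · have hbe : (e.1 == k) = false := by simpa using h
      simp [hbe, PySem.Dict.getD_modify, Ne.symm h]

-- splitting a run: takeWhile/dropWhile through a block that satisfies p followed by a block that does not
theorem pv_take_drop {α : Type} (p : α → Bool) (xs ys : List α)
    (h1 : ∀ x ∈ xs, p x = true) (h2 : ∀ y ∈ ys, p y = false) :
    (xs ++ ys).takeWhile p = xs ∧ (xs ++ ys).dropWhile p = ys := by
  induction xs with
  | nil =>
    cases ys with
    | nil => simp
    | cons y ys => simp [h2 y (by simp)]
  | cons x xs ih =>
    have hx := h1 x (by simp)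
    have := ih (fun a ha => h1 a (by simp [ha]))
    simp [hx, this.1, this.2]

-- groupby over a concatenation of nonempty constant-key blocks with pairwise distinct keys
theorem pv_group_flat (ks : List (String × String)) (f : (String × String) → List String)
    (hnd : ks.Pairwise (fun a b => a ≠ b)) (hne : ∀ k ∈ ks, f k ≠ []) :
    pvGroupRuns (ks.flatMap (fun k => (f k).map (fun m => (k, m))))
      = ks.map (fun k => (k.1, k.2, f k)) := by
  induction ks with
  | nil => simp [pvGroupRuns]
  | cons k ks ih =>
    obtain ⟨m, ms, hfk⟩ : ∃ m ms, f k = m :: ms := by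
      cases h : f k with
      | nil => exact absurd h (hne k (by simp))
      | cons m ms => exact ⟨m, ms, rfl⟩
    have hk : ∀ b ∈ ks, k ≠ b := (List.pairwise_cons.mp hnd).1
    have htd := pv_take_drop (fun x => x.1 == k)
      (ms.map (fun m => (k, m))) (ks.flatMap (fun k => (f k).map (fun m => (k, m))))
      (by rintro x hx; simp only [List.mem_map] at hx; obtain ⟨m', _, rfl⟩ := hx; simp)
      (by
        rintro y hy
        simp only [List.mem_flatMap, List.mem_map] at hy
        obtain ⟨b, hb, m', _, rfl⟩ := hy
        simpa using (hk b hb).symm)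
    rw [List.flatMap_cons, hfk, List.map_cons, List.cons_append, pvGroupRuns]
    simp only [htd.1, htd.2]
    rw [ih (List.pairwise_cons.mp hnd).2 (fun b hb => hne b (by simp [hb]))]
    simp [hfk, List.map_map, Function.comp_def]

-- the flattened blocks are strictly increasing under the event sort key
theorem pv_pairwise_flat (ks : List (String × String)) (f : (String × String) → List String)
    (hks : ks.Pairwise (fun a b => toLex (a.1, a.2) < toLex (b.1, b.2)))
    (hf : ∀ k ∈ ks, (f k).Pairwise (· < ·)) :
    (ks.flatMap (fun k => (f k).map (fun m => (k, m)))).Pairwise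
      (fun x y => toLex (toLex (x.1.1, x.1.2), x.2) < toLex (toLex (y.1.1, y.1.2), y.2)) := by
  induction ks with
  | nil => simp
  | cons k ks ih =>
    rw [List.flatMap_cons, List.pairwise_append]
    refine ⟨?_, ih (List.pairwise_cons.mp hks).2 (fun b hb => hf b (by simp [hb])), ?_⟩
    · exact List.Pairwise.map _
        (fun a b h => by simp [Prod.Lex.toLex_lt_toLex, h]) (hf k (by simp))
    · rintro x hx y hy
      simp only [List.mem_map] at hx
      obtain ⟨m1, _, rfl⟩ := hx
      simp only [List.mem_flatMap, List.mem_map] at hy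
      obtain ⟨b, hb, m2, _, rfl⟩ := hy
      have hkb := (List.pairwise_cons.mp hks).1 b hb
      simp only [Prod.Lex.toLex_lt_toLex] at hkb ⊢
      exact Or.inl hkb

theorem pv_main (mc : List (String × List String)) :
    build_edge_list mc = build_edge_list_alt mc := by
  classical
  set K : PySem.Set (String × String) :=
    PySem.Set.ofList ((pvEvents mc).map (fun e => e.1)) with hK
  set V : (String × String) → PySem.Set String :=
    fun k => PySem.Set.ofList (((pvEvents mc).filter (fun e => e.1 == k)).map (fun e => e.2)) with hV
  set SK := PySem.List.sorted K (fun k => toLex (k.1, k.2)) with hSK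
  have hKnd : K.Nodup := PySem.Set.nodup_ofList _
  have hSKperm : SK.Perm K := PySem.List.sorted_perm _ _ _
  have hSKnd : SK.Nodup := hSKperm.symm.nodup hKnd
  have hSKlt : SK.Pairwise (fun a b => toLex (a.1, a.2) < toLex (b.1, b.2)) := by
    have h1 := PySem.List.sorted_pairwise (xs := K) (key := fun k => toLex (k.1, k.2))
    have h2 : SK.Pairwise (fun a b => a ≠ b) := hSKnd
    rw [← hSK] at h1
    exact (h1.and h2).imp (fun {a b} h => lt_of_le_of_ne h.1 (by
      simpa [toLex_inj, Prod.ext_iff] using h.2))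
  have hmemV : ∀ (k : String × String) (m : String), m ∈ V k ↔ (k, m) ∈ pvEvents mc := by
    intro k m
    simp only [hV, PySem.Set.mem_ofList, List.mem_map, List.mem_filter, beq_iff_eq]
    constructor
    · rintro ⟨e, ⟨he, rfl⟩, rfl⟩
      simpa using he
    · intro h
      exact ⟨(k, m), ⟨h, rfl⟩, rfl⟩
  have hmemK : ∀ k : String × String, k ∈ K ↔ ∃ m, (k, m) ∈ pvEvents mc := by
    intro k
    simp only [hK, PySem.Set.mem_ofList, List.mem_map]
    constructor
    · rintro ⟨e, he, rfl⟩
      exact ⟨e.2, he⟩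
    · rintro ⟨m, hm⟩
      exact ⟨(k, m), hm, rfl⟩
  -- ===== A's side =====
  set pm := (pvEvents mc).foldl
      (fun pm e => pm.modify e.1 [] (fun s => PySem.Set.add s e.2)) PySem.Dict.empty with hpm
  have hkeys : pm.keys = K := by
    have := PySem.Dict.keys_foldl_modify_key (pvEvents mc)
      (fun e : (String × String) × String => e.1) ([] : PySem.Set String)
      (fun _ e => fun s => PySem.Set.add s e.2) PySem.Dict.empty
    simpa [PySem.Dict.keys_empty] using this
  have hknd : pm.keys.Nodup := by
    exact PySem.Dict.nodup_keys_foldl_modify_key (pvEvents mc)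
      (fun e : (String × String) × String => e.1) ([] : PySem.Set String)
      (fun _ e => fun s => PySem.Set.add s e.2) PySem.Dict.empty PySem.Dict.nodup_keys_empty
  have hgetD : ∀ k, pm.getD k [] = V k := by
    intro k
    rw [hpm, pv_getD_fold]
    simp [PySem.Dict.getD_empty, hV]
    rfl
  have hitems : pm.items = K.map (fun k => (k, V k)) := by
    rw [PySem.Dict.items_eq_map_keys pm hknd ([] : PySem.Set String), hkeys]
    exact List.map_congr_left (fun k _ => by rw [hgetD])
  have hAs : build_edge_list mc
      = (PySem.List.sorted pm.items (fun it => toLex (it.1.1, it.1.2))).map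
          (fun it => (it.1.1, it.1.2, PySem.List.sorted it.2 (fun m => m))) := by
    show (PySem.List.sorted2
        (mc.foldl (fun pm mc =>
          (pvCombs2 mc.2).foldl (fun pm p =>
            pm.modify (pvPairKey p.1 p.2) [] (fun s => PySem.Set.add s mc.1)) pm)
          PySem.Dict.empty).items (fun it => it.1.1) (fun it => it.1.2)).foldl
        (fun edges it => edges ++ [(it.1.1, it.1.2, PySem.List.sorted it.2 (fun m => m))]) [] = _
    rw [pv_fold_flatten, ← hpm, pv_sorted2_eq_sorted_toLex,
      PySem.List.foldl_append_singleton_eq_map]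
    simp
  have hsortedA : PySem.List.sorted pm.items (fun it => toLex (it.1.1, it.1.2))
      = SK.map (fun k => (k, V k)) := by
    apply PySem.List.sorted_eq_of_perm_of_pairwise_lt
    · rw [hitems]; exact hSKperm.map _
    · exact List.Pairwise.map _ (fun a b h => h) hSKlt
  -- ===== B's side =====
  have hEL : mc.flatMap (fun r => (pvPairsLoop [] r.2).map (fun p => (p, r.1))) = pvEvents mc := by
    simp [pvEvents, pvPairsLoop_eq, List.map_map, Function.comp_def]
  set C := SK.flatMap (fun k => (PySem.List.sorted (V k) (fun m => m)).map (fun m => (k, m)))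
    with hC
  have hCpw : C.Pairwise
      (fun x y => toLex (toLex (x.1.1, x.1.2), x.2) < toLex (toLex (y.1.1, y.1.2), y.2)) := by
    refine pv_pairwise_flat SK _ hSKlt (fun k _ => ?_)
    exact PySem.List.sorted_ofList_pairwise_lt _
  have hCnd : C.Nodup := hCpw.imp (fun {a b} h => by
    intro rfl_ab
    subst rfl_ab
    exact lt_irrefl _ h)
  have hCsorted : PySem.List.sorted (PySem.Set.ofList (pvEvents mc))
      (fun e => toLex (toLex (e.1.1, e.1.2), e.2)) = C := by
    apply PySem.List.sorted_eq_of_perm_of_pairwise_lt _ _ _ ?_ hCpw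
    rw [List.perm_ext_iff_of_nodup hCnd (PySem.Set.nodup_ofList _)]
    rintro ⟨k, m⟩
    rw [hC, PySem.Set.mem_ofList]
    simp only [List.mem_flatMap, List.mem_map]
    constructor
    · rintro ⟨a, ha, m', hm', heq⟩
      have hVm := (hmemV a m').mp ((PySem.List.mem_sorted _ _ _ _).mp hm')
      exact heq ▸ hVm
    · intro hx
      have hkK : k ∈ K := (hmemK k).mpr ⟨m, hx⟩
      refine ⟨k, ?_, m, ?_, rfl⟩
      · rw [hSK]; exact (PySem.List.mem_sorted _ _ _ _).mpr hkK
      · exact (PySem.List.mem_sorted _ _ _ _).mpr ((hmemV k m).mpr hx)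
  have hBne : ∀ k ∈ SK, PySem.List.sorted (V k) (fun m => m) ≠ [] := by
    intro k hkSK
    have hkK : k ∈ K := hSKperm.mem_iff.mp hkSK
    obtain ⟨m, hm⟩ := (hmemK k).mp hkK
    exact List.ne_nil_of_mem ((PySem.List.mem_sorted _ _ _ _).mpr ((hmemV k m).mpr hm))
  have hBs : build_edge_list_alt mc
      = SK.map (fun k => (k.1, k.2, PySem.List.sorted (V k) (fun m => m))) := by
    show pvGroupRuns (PySem.List.sorted
      (PySem.Set.ofList (mc.flatMap (fun r => (pvPairsLoop [] r.2).map (fun p => (p, r.1)))))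
      (fun e => toLex (toLex (e.1.1, e.1.2), e.2))) = _
    rw [hEL, hCsorted, hC, pv_group_flat SK _ hSKnd hBne]
  rw [hAs, hsortedA, List.map_map, hBs]
  rfl

-- ===== VERDICT (by name: the statement is the Claim_ definition above) =====
theorem build_edge_list_spec : Claim_equal_build_edge_list := by
  intro mc _hdom
  unfold Spec_build_edge_list
  exact pv_main mc
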